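-- pv_equiv track=rewrite | github.com/Tiburso/Trabalhos-IST | FP/IST Capitulo 6.1/IST 6.1.1.py | apenas_numeros_impares
-- ===== SOURCE A (Python) =====
-- def apenas_numeros_impares(num):
--     if num < 0 or not isinstance(num,int):
--         raise ValueError('argumento invalido')
--     if num == 0:
--         return 0
--     elif num % 10 % 2 != 0:
--         return num % 10 + 10 * apenas_numeros_impares(num // 10)
--     else:
--         return apenas_numeros_impares(num // 10)
-- ===== SOURCE B (Python) =====
-- def apenas_numeros_impares(num):
--     if num < 0 or not isinstance(num, int):
--         raise ValueError('argumento invalido')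
--     result = 0
--     place = 1
--     while num > 0:
--         d = num % 10
--         num //= 10
--         if d % 2 == 1:
--             result += d * place
--             place *= 10
--     return result
-- ===== Notes on version B (the rewrite author's own statement) =====
-- stated objective: alternative
-- what changed: Replaces the recursive digit-packing with an iterative while-loop maintaining an accumulator and a place-value multiplier advanced only on odd digits.
import Mathlib
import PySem

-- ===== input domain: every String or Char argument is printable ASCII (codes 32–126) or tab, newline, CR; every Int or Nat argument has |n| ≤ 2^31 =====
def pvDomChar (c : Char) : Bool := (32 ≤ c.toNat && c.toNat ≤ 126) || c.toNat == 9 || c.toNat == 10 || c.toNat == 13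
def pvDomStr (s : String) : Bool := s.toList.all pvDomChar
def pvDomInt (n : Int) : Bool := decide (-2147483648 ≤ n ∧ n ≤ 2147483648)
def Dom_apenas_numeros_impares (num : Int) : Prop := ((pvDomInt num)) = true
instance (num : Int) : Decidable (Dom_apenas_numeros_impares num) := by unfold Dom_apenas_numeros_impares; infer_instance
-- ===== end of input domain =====

-- B replaces A's recursion with an iterative loop (accumulator + place-value multiplier
-- advanced only on odd digits); same values, same validation guard on negatives.


-- ===== PORT A =====
-- Python A raises ValueError on num < 0; that case is excluded by Pre_ (port returns 0 there, unused).
def apenas_numeros_impares (num : Int) : Int :=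
  if num ≤ 0 then 0
  else if PySem.Int.mod (PySem.Int.mod num 10) 2 ≠ 0 then
    PySem.Int.mod num 10 + 10 * apenas_numeros_impares (PySem.Int.floordiv num 10)
  else
    apenas_numeros_impares (PySem.Int.floordiv num 10)
termination_by num.toNat
decreasing_by
  all_goals
    have h2 : PySem.Int.floordiv num 10 = num / 10 := PySem.Int.floordiv_eq_ediv_of_pos (by omega)
    simp only [h2]; omega

-- ===== PORT B =====
-- while num > 0 loop of Source B, as tail recursion over the loop state (result, place).
def apenasAltLoop (num result place : Int) : Int :=
  if num > 0 then
    let d := PySem.Int.mod num 10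
    let num' := PySem.Int.floordiv num 10
    if PySem.Int.mod d 2 = 1 then
      apenasAltLoop num' (result + d * place) (place * 10)
    else
      apenasAltLoop num' result place
  else result
termination_by num.toNat
decreasing_by
  all_goals
    have h2 : PySem.Int.floordiv num 10 = num / 10 := PySem.Int.floordiv_eq_ediv_of_pos (by omega)
    simp only [h2]; omega

def apenas_numeros_impares_alt (num : Int) : Int :=
  apenasAltLoop num 0 1

-- ===== PRECONDITION & SPEC =====
-- Pre_ excludes num < 0, on which Python A raises ValueError.
def Pre_apenas_numeros_impares (num : Int) : Prop := 0 ≤ num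
instance (num : Int) : Decidable (Pre_apenas_numeros_impares num) := by unfold Pre_apenas_numeros_impares; infer_instance
def pvWitness_apenas_numeros_impares : Int := 12345

def Spec_apenas_numeros_impares (num : Int) (out : Int) : Prop := out = apenas_numeros_impares_alt num
instance (num : Int) (out : Int) : Decidable (Spec_apenas_numeros_impares num out) := by unfold Spec_apenas_numeros_impares; infer_instance

-- ===== CLAIM (what is proved, stated in full; the proofs are below) =====
def Claim_equal_apenas_numeros_impares : Prop := ∀ (num : Int), Dom_apenas_numeros_impares num → Pre_apenas_numeros_impares num → Spec_apenas_numeros_impares num (apenas_numeros_impares num)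

-- ===== LEMMAS AND PROOFS =====

-- Loop invariant: for num ≥ 0, the loop adds place · (A's packed value) to the accumulator.
theorem apenasAltLoop_eq (n : Nat) :
    ∀ (num result place : Int), num.toNat = n → 0 ≤ num →
      apenasAltLoop num result place = result + place * apenas_numeros_impares num := by
  induction n using Nat.strong_induction_on with
  | _ n ih =>
    intro num result place hn hnum
    rw [apenasAltLoop, apenas_numeros_impares]
    by_cases hpos : num > 0
    · have h2 : PySem.Int.floordiv num 10 = num / 10 := PySem.Int.floordiv_eq_ediv_of_pos (by omega)
      have hmod : PySem.Int.mod num 10 = num % 10 := PySem.Int.mod_eq_emod_of_pos (by omega)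
      have hmod2 : ∀ x : Int, PySem.Int.mod x 2 = x % 2 := fun x => PySem.Int.mod_eq_emod_of_pos (by omega)
      have hlt : (num / 10).toNat < n := by omega
      have hnn : 0 ≤ num / 10 := by positivity
      have hrec := fun r p => ih _ hlt (num / 10) r p rfl hnn
      simp only [hpos, if_true, h2, hmod, hmod2, hrec]
      have hle : ¬ num ≤ 0 := by omega
      simp only [hle, if_false]
      have hd : num % 10 % 2 = 0 ∨ num % 10 % 2 = 1 := by omega
      rcases hd with hd | hd <;> simp [hd]; ring
    · have h0 : num = 0 := by omega
      simp [h0]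

-- ===== VERDICT (by name: the statement is the Claim_ definition above) =====
theorem apenas_numeros_impares_spec : Claim_equal_apenas_numeros_impares := by
  intro num _ hpre
  unfold Spec_apenas_numeros_impares apenas_numeros_impares_alt
  rw [apenasAltLoop_eq num.toNat num 0 1 rfl hpre]
  ring
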